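-- pv_equiv track=rewrite | github.com/gpiero10/gpiero | Segundo Parcial/Parcial 3/parcial3.py | torneo_de_gallinas
-- ===== SOURCE A (Python) =====
-- def torneo_de_gallinas(estrategias:dict[str,str])->dict[str,int]:
--     participantes:list[str] = []
--     cagones:list[str] = []
--     valientes:list[str] = []
--     for pata in estrategias.keys():
--         participantes.append(pata)
--     for chabon in participantes:
--         if estrategias[chabon] == "me desvio siempre":
--             cagones.append(chabon)
--         elif estrategias[chabon] == "me la banco y no me desvio":
--             valientes.append(chabon)
--     puntaje:dict[str,int] = {}
--     for chabon in participantes: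
--         if chabon in valientes:
--             puntaje[chabon] = (len(valientes) - 1)*(-5) + len(cagones)*10
--         elif chabon in cagones:
--             puntaje[chabon] = (len(cagones) - 1)*(-10) + len(valientes)*(-15)
--     return puntaje
-- ===== SOURCE B (Python) =====
-- def torneo_de_gallinas(estrategias: dict[str, str]) -> dict[str, int]:
--     # Event-driven scoring: all valientes share one score and all cagones share
--     # another, so maintain those two running scores and update them by fixed
--     # deltas as each participant joins; no group counts are ever taken.
--     sV, sC = 5, 10  # scores for a (hypothetical) sole member of each group
--     orden: list[tuple[str, bool]] = []
--     for p, s in estrategias.items():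
--         if s == "me la banco y no me desvio":
--             sV -= 5   # one more rival valiente for every valiente
--             sC -= 15  # every cagon loses to one more valiente
--             orden.append((p, True))
--         elif s == "me desvio siempre":
--             sV += 10  # every valiente beats one more cagon
--             sC -= 10  # one more rival cagon for every cagon
--             orden.append((p, False))
--     return {p: sV if val else sC for p, val in orden}
-- ===== Notes on version B (the rewrite author's own statement) =====
-- stated objective: alternative
-- what changed: B replaces A's group-list building and per-key list-membership scoring by an event-driven single pass: it maintains the two shared running scores, updating them by fixed deltas (-5/-15 for a valiente, +10/-10 for a cagon) as each participant arrives, tags each recognized participant, and emits the final scores; no group counts or membership tests are taken.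
import Mathlib
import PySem

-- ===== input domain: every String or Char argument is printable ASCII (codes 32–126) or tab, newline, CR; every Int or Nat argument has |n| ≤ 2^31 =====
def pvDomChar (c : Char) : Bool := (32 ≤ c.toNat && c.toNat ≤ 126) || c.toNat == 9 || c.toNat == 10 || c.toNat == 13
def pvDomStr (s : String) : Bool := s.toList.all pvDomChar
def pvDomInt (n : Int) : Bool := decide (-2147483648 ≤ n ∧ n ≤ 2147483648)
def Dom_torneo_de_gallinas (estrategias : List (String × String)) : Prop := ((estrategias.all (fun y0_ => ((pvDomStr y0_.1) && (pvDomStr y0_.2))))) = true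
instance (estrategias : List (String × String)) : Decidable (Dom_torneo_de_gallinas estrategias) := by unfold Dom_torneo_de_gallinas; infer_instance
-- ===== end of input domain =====

-- B replaces A's group lists and membership tests by an event-driven single pass that maintains
-- the two shared running scores via fixed per-arrival deltas (objective: alternative algorithm).


-- ===== PORT A =====
def torneo_de_gallinas (estrategias : List (String × String)) : List (String × Int) :=
  let participantes : List String := estrategias.foldl (fun acc p => acc ++ [p.1]) []
  let cv : List String × List String := participantes.foldl
    (fun (acc : List String × List String) chabon =>
      if (PySem.Dict.mk estrategias).get? chabon = some "me desvio siempre" then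
        (acc.1 ++ [chabon], acc.2)
      else if (PySem.Dict.mk estrategias).get? chabon = some "me la banco y no me desvio" then
        (acc.1, acc.2 ++ [chabon])
      else acc) ([], [])
  let cagones : List String := cv.1
  let valientes : List String := cv.2
  let puntaje : PySem.Dict String Int := participantes.foldl
    (fun (pt : PySem.Dict String Int) chabon =>
      if chabon ∈ valientes then
        pt.insert chabon (((valientes.length : Int) - 1) * (-5) + (cagones.length : Int) * 10)
      else if chabon ∈ cagones then
        pt.insert chabon (((cagones.length : Int) - 1) * (-10) + (valientes.length : Int) * (-15))
      else pt) PySem.Dict.empty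
  puntaje.items

-- ===== PORT B =====
def torneo_de_gallinas_alt (estrategias : List (String × String)) : List (String × Int) :=
  let st : Int × Int × List (String × Bool) := estrategias.foldl
    (fun (st : Int × Int × List (String × Bool)) p =>
      if p.2 == "me la banco y no me desvio" then
        (st.1 - 5, st.2.1 - 15, st.2.2 ++ [(p.1, true)])
      else if p.2 == "me desvio siempre" then
        (st.1 + 10, st.2.1 - 10, st.2.2 ++ [(p.1, false)])
      else st) (5, 10, [])
  st.2.2.map (fun q => (q.1, if q.2 then st.1 else st.2.1))

-- ===== PRECONDITION & SPEC =====
-- The Python argument is a dict, whose keys are necessarily distinct; Pre_ restricts the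
-- association-list encoding to exactly the lists that represent a Python dict.
def Pre_torneo_de_gallinas (estrategias : List (String × String)) : Prop :=
  (estrategias.map Prod.fst).Nodup
instance (estrategias : List (String × String)) : Decidable (Pre_torneo_de_gallinas estrategias) := by
  unfold Pre_torneo_de_gallinas; infer_instance

def pvWitness_torneo_de_gallinas : (List (String × String)) :=
  [("ana", "me desvio siempre"), ("bob", "me la banco y no me desvio"), ("cleo", "paso")]

def Spec_torneo_de_gallinas (estrategias : List (String × String)) (out : List (String × Int)) : Prop := out = torneo_de_gallinas_alt estrategias
instance (estrategias : List (String × String)) (out : List (String × Int)) : Decidable (Spec_torneo_de_gallinas estrategias out) := by unfold Spec_torneo_de_gallinas; infer_instance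

-- ===== CLAIM (what is proved, stated in full; the proofs are below) =====
def Claim_equal_torneo_de_gallinas : Prop := ∀ (estrategias : List (String × String)), Dom_torneo_de_gallinas estrategias → Pre_torneo_de_gallinas estrategias → Spec_torneo_de_gallinas estrategias (torneo_de_gallinas estrategias)

-- ===== LEMMAS AND PROOFS =====
theorem tdg_lookup_of_mem (es : List (String × String)) (hnd : (es.map Prod.fst).Nodup)
    (p : String × String) (hp : p ∈ es) :
    (PySem.Dict.mk es).get? p.1 = some p.2 := by
  obtain ⟨k, s⟩ := p
  exact PySem.Dict.get?_of_mem_items _ hp (by simpa [PySem.Dict.keys] using hnd)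

theorem tdg_loop2 (es : List (String × String)) (hnd : (es.map Prod.fst).Nodup)
    (l : List (String × String)) (hl : ∀ p ∈ l, p ∈ es) (acc : List String × List String) :
    (l.map Prod.fst).foldl
      (fun (acc : List String × List String) chabon =>
        if (PySem.Dict.mk es).get? chabon = some "me desvio siempre" then
          (acc.1 ++ [chabon], acc.2)
        else if (PySem.Dict.mk es).get? chabon = some "me la banco y no me desvio" then
          (acc.1, acc.2 ++ [chabon])
        else acc) acc
    = (acc.1 ++ (l.filter (fun p => p.2 == "me desvio siempre")).map Prod.fst,
       acc.2 ++ (l.filter (fun p => p.2 == "me la banco y no me desvio")).map Prod.fst) := by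
  induction l generalizing acc with
  | nil => simp
  | cons p rest ih =>
    have hp : p ∈ es := hl p (by simp)
    have hlook := tdg_lookup_of_mem es hnd p hp
    have hrest : ∀ q ∈ rest, q ∈ es := fun q hq => hl q (by simp [hq])
    simp only [List.map_cons, List.foldl_cons, List.filter_cons, hlook]
    by_cases hc : p.2 = "me desvio siempre"
    · simp [hc, ih hrest]
    · by_cases hv : p.2 = "me la banco y no me desvio"
      · simp [hv, ih hrest]
      · simp [hc, hv, ih hrest]

theorem tdg_mem_cat (es : List (String × String)) (hnd : (es.map Prod.fst).Nodup)
    (p : String × String) (hp : p ∈ es) (s : String) :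
    p.1 ∈ (es.filter (fun q => q.2 == s)).map Prod.fst ↔ p.2 = s := by
  constructor
  · intro h
    obtain ⟨q, hq, hq1⟩ := List.mem_map.mp h
    have hq2 := List.mem_filter.mp hq
    have : q = p := List.inj_on_of_nodup_map hnd hq2.1 hp hq1
    subst this
    simpa using hq2.2
  · intro h
    exact List.mem_map.mpr ⟨p, List.mem_filter.mpr ⟨hp, by simp [h]⟩, rfl⟩

theorem tdg_loop3 (es : List (String × String)) (hnd : (es.map Prod.fst).Nodup)
    (sV sC : Int) (l : List (String × String)) (hl : ∀ p ∈ l, p ∈ es)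
    (hlnd : (l.map Prod.fst).Nodup) (d : PySem.Dict String Int)
    (hdnd : d.keys.Nodup) (hdis : ∀ p ∈ l, p.1 ∉ d.keys) :
    ((l.map Prod.fst).foldl
      (fun (pt : PySem.Dict String Int) chabon =>
        if chabon ∈ (es.filter (fun q => q.2 == "me la banco y no me desvio")).map Prod.fst then
          pt.insert chabon sV
        else if chabon ∈ (es.filter (fun q => q.2 == "me desvio siempre")).map Prod.fst then
          pt.insert chabon sC
        else pt) d).items
    = d.items ++ l.filterMap (fun p =>
        if p.2 == "me la banco y no me desvio" then some (p.1, sV)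
        else if p.2 == "me desvio siempre" then some (p.1, sC)
        else none) := by
  induction l generalizing d with
  | nil => simp
  | cons p rest ih =>
    have hp : p ∈ es := hl p (by simp)
    have hrest : ∀ q ∈ rest, q ∈ es := fun q hq => hl q (by simp [hq])
    have hrestnd : (rest.map Prod.fst).Nodup := by simpa using hlnd.of_cons
    have hhead : p.1 ∉ rest.map Prod.fst := by
      simp only [List.map_cons, List.nodup_cons] at hlnd
      exact hlnd.1
    have hpd : p.1 ∉ d.keys := hdis p (by simp)
    have hcont : d.contains p.1 = false := by
      rw [PySem.Dict.contains_eq_decide_mem_keys]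
      simp [hpd]
    have hmemV := tdg_mem_cat es hnd p hp "me la banco y no me desvio"
    have hmemC := tdg_mem_cat es hnd p hp "me desvio siempre"
    have hnd' : ∀ w : Int, ((d.insert p.1 w).keys).Nodup := by
      intro w
      rw [PySem.Dict.keys_insert_of_not_contains _ _ hcont]
      simp only [List.nodup_append, List.nodup_singleton, true_and]
      refine ⟨hdnd, ?_⟩
      intro a ha b hb
      simp only [List.mem_singleton] at hb
      subst hb
      exact fun h => hpd (h ▸ ha)
    have hdis' : ∀ w : Int, ∀ q ∈ rest, q.1 ∉ (d.insert p.1 w).keys := by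
      intro w q hq
      rw [PySem.Dict.keys_insert_of_not_contains _ _ hcont]
      simp only [List.mem_append, List.mem_singleton]
      rintro (h | h)
      · exact hdis q (by simp [hq]) h
      · exact hhead (h ▸ List.mem_map.mpr ⟨q, hq, rfl⟩)
    simp only [List.map_cons, List.foldl_cons, List.filterMap_cons]
    by_cases hv : p.2 = "me la banco y no me desvio"
    · rw [if_pos (hmemV.mpr hv), ih hrest hrestnd _ (hnd' sV) (hdis' sV),
        PySem.Dict.items_insert_of_not_contains _ _ hcont]
      simp [hv]
    · rw [if_neg (fun h => hv (hmemV.mp h))]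
      by_cases hc : p.2 = "me desvio siempre"
      · rw [if_pos (hmemC.mpr hc), ih hrest hrestnd _ (hnd' sC) (hdis' sC),
          PySem.Dict.items_insert_of_not_contains _ _ hcont]
        simp [hc]
      · rw [if_neg (fun h => hc (hmemC.mp h)),
          ih hrest hrestnd d hdnd (fun q hq => hdis q (by simp [hq]))]
        simp [hv, hc]

-- B's loop invariant: the running scores are linear in the number of events seen so far,
-- and the tag list records the recognized participants in order.
theorem tdg_bloop (l : List (String × String)) (a b : Int) (acc : List (String × Bool)) :
    l.foldl
      (fun (st : Int × Int × List (String × Bool)) p =>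
        if p.2 == "me la banco y no me desvio" then
          (st.1 - 5, st.2.1 - 15, st.2.2 ++ [(p.1, true)])
        else if p.2 == "me desvio siempre" then
          (st.1 + 10, st.2.1 - 10, st.2.2 ++ [(p.1, false)])
        else st) (a, b, acc)
    = (a - 5 * (l.countP (fun p => p.2 == "me la banco y no me desvio") : Int)
         + 10 * (l.countP (fun p => p.2 == "me desvio siempre") : Int),
       b - 15 * (l.countP (fun p => p.2 == "me la banco y no me desvio") : Int)
         - 10 * (l.countP (fun p => p.2 == "me desvio siempre") : Int),
       acc ++ l.filterMap (fun p =>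
         if p.2 == "me la banco y no me desvio" then some (p.1, true)
         else if p.2 == "me desvio siempre" then some (p.1, false)
         else none)) := by
  induction l generalizing a b acc with
  | nil => simp
  | cons p rest ih =>
    simp only [List.foldl_cons, List.countP_cons, List.filterMap_cons]
    by_cases hv : p.2 = "me la banco y no me desvio"
    · rw [ih]
      simp [hv]
      constructor <;> ring
    · by_cases hc : p.2 = "me desvio siempre"
      · rw [ih]
        simp [hc]
        constructor <;> ring
      · rw [ih]
        simp [hv, hc]

-- ===== VERDICT (by name: the statement is the Claim_ definition above) =====
theorem torneo_de_gallinas_spec : Claim_equal_torneo_de_gallinas := by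
  intro es _ hpre
  unfold Spec_torneo_de_gallinas torneo_de_gallinas torneo_de_gallinas_alt
  rw [PySem.List.foldl_append_singleton_eq_map]
  simp only [List.nil_append]
  rw [tdg_loop2 es hpre es (fun p hp => hp) ([], [])]
  simp only [List.nil_append]
  rw [tdg_loop3 es hpre _ _ es (fun p hp => hp) hpre PySem.Dict.empty
    (by simp [PySem.Dict.keys_empty]) (by simp [PySem.Dict.keys_empty])]
  rw [show (PySem.Dict.empty : PySem.Dict String Int).items = [] from rfl]
  rw [tdg_bloop es 5 10 []]
  simp only [List.nil_append, List.map_filterMap]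
  have hv : ((es.filter (fun q => q.2 == "me la banco y no me desvio")).map Prod.fst).length
      = es.countP (fun p => p.2 == "me la banco y no me desvio") := by
    simp [List.countP_eq_length_filter]
  have hc : ((es.filter (fun q => q.2 == "me desvio siempre")).map Prod.fst).length
      = es.countP (fun p => p.2 == "me desvio siempre") := by
    simp [List.countP_eq_length_filter]
  rw [hv, hc]
  apply List.filterMap_congr
  intro p _
  by_cases h1 : p.2 = "me la banco y no me desvio"
  · simp [h1]; ring
  · by_cases h2 : p.2 = "me desvio siempre"
    · simp [h2]; ring
    · simp [h1, h2]
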